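-- pv_equiv track=rewrite | github.com/mec-correcaotextual/punctuate | evaluation/evaluation.py | get_valid_dataset
-- ===== SOURCE A (Python) =====
-- from collections import defaultdict, Counter
--
-- def check_if_empty(labels):
--     if len(list(set(labels))) == 1 and list(set(labels))[0] == "O":
--         return True
--     return False
--
-- def get_valid_dataset(dataset):
--     valid_labels = defaultdict(list)
--     datanames = list(dataset.keys())
--
--     for annts in zip(*dataset.values()):
--
--         if any([check_if_empty(annt["labels"]) for annt in annts]):
--             continue
--
--         for j in range(len(annts)):
--             valid_labels[datanames[j]].append(annts[j]["labels"])
--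
--     return valid_labels
-- ===== SOURCE B (Python) =====
-- from collections import defaultdict
--
-- def get_valid_dataset(dataset):
--     cols = list(dataset.values())
--     n = min((len(c) for c in cols), default=0)
--     bad = set()
--     for col in cols:
--         for i in range(n):
--             if set(col[i]["labels"]) == {"O"}:
--                 bad.add(i)
--     keep = [i for i in range(n) if i not in bad]
--     valid_labels = defaultdict(list)
--     if keep:
--         for name, col in dataset.items():
--             valid_labels[name] = [col[i]["labels"] for i in keep]
--     return valid_labels
-- ===== Notes on version B (the rewrite author's own statement) =====
-- stated objective: alternative
-- what changed: B never forms row tuples: it scans each value column independently to collect a set of bad row indices (rows whose label set is exactly {'O'} in some column), then slices every column by the surviving index list, while A zips all columns into row tuples and appends per-key inside the row loop.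
import Mathlib
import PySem

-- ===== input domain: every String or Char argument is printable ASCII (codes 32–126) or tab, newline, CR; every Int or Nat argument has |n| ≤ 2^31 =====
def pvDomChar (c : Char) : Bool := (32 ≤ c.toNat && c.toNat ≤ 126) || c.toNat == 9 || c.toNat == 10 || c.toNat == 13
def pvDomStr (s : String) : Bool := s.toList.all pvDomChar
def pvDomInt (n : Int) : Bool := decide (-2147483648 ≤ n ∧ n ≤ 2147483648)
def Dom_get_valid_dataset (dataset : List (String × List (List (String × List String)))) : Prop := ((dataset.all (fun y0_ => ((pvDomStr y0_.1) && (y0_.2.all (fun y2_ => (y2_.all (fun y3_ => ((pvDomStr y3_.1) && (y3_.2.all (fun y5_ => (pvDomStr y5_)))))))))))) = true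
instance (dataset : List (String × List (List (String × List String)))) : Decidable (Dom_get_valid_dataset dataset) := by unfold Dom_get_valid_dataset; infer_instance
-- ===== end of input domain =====

-- B avoids zip and row tuples altogether: it scans each value column independently to collect a set of
-- bad row indices, then slices every column by the surviving index list. Objective: alternative
-- (column-major index-set algorithm instead of A's row-major zip-and-append; same asymptotic cost).

-- ===== PORT A =====

-- zip(*valueLists): truncates to the shortest list; zero iterables give the empty zip
def pvZipAll (ls : List (List (List (String × List String)))) : List (List (List (String × List String))) :=
  (List.range (((ls.map List.length).min?).getD 0)).map (fun i => ls.map (fun l => l.getD i []))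

def check_if_empty (labels : List String) : Bool :=
  if (PySem.Set.ofList labels).length = 1 ∧ (PySem.Set.ofList labels).getD 0 "" = "O" then true else false

def get_valid_dataset (dataset : List (String × List (List (String × List String)))) : List (String × List (List String)) :=
  let datanames := dataset.map (·.1)
  let valid_labels : PySem.Dict String (List (List String)) :=
    (pvZipAll (dataset.map (·.2))).foldl (fun vl annts =>
      if annts.any (fun annt => check_if_empty (PySem.Dict.getD (PySem.Dict.mk annt) "labels" [])) then vl
      else (List.range annts.length).foldl (fun vl j =>
        vl.modify (datanames.getD j "") [] (· ++ [PySem.Dict.getD (PySem.Dict.mk (annts.getD j [])) "labels" []])) vl)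
      PySem.Dict.empty
  valid_labels.items

-- ===== PORT B =====
-- col[i] for i < n ≤ len(col) is an in-range non-negative index: List.getD is exact here.
def get_valid_dataset_alt (dataset : List (String × List (List (String × List String)))) : List (String × List (List String)) :=
  let cols := dataset.map (·.2)
  let n := ((cols.map List.length).min?).getD 0
  let bad : PySem.Set Nat := cols.foldl (fun bad col =>
    (List.range n).foldl (fun bad i =>
      if PySem.Set.equal (PySem.Set.ofList (PySem.Dict.getD (PySem.Dict.mk (col.getD i [])) "labels" [])) ["O"]
      then PySem.Set.add bad i else bad) bad) PySem.Set.empty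
  let keep := (List.range n).filter (fun i => ! PySem.Set.contains bad i)
  let valid_labels : PySem.Dict String (List (List String)) :=
    if keep.isEmpty then PySem.Dict.empty
    else dataset.foldl (fun vl kv =>
      vl.insert kv.1 (keep.map (fun i => PySem.Dict.getD (PySem.Dict.mk (kv.2.getD i [])) "labels" []))) PySem.Dict.empty
  valid_labels.items

-- ===== PRECONDITION & SPEC =====
-- Pre_ excludes (a) association lists with duplicate keys, which do not represent any Python dict
-- (A's argument is a dict, so no Python input is excluded), and (b) inputs where some row dict
-- within zip's truncation range lacks the "labels" key, on which the Python A raises KeyError.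
def Pre_get_valid_dataset (dataset : List (String × List (List (String × List String)))) : Prop :=
  (dataset.map Prod.fst).Nodup ∧
  ∀ kv ∈ dataset, ∀ row ∈ kv.2.take ((((dataset.map (·.2)).map List.length).min?).getD 0),
    (PySem.Dict.get? (PySem.Dict.mk row) "labels").isSome
instance (dataset : List (String × List (List (String × List String)))) : Decidable (Pre_get_valid_dataset dataset) := by unfold Pre_get_valid_dataset; infer_instance

def pvWitness_get_valid_dataset : (List (String × List (List (String × List String)))) :=
  [("a", [[("labels", ["B", "O"])], [("labels", ["O"])]]), ("b", [[("labels", ["I"])], [("labels", ["I"])]])]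

def Spec_get_valid_dataset (dataset : List (String × List (List (String × List String)))) (out : List (String × List (List String))) : Prop := out = get_valid_dataset_alt dataset
instance (dataset : List (String × List (List (String × List String)))) (out : List (String × List (List String))) : Decidable (Spec_get_valid_dataset dataset out) := by unfold Spec_get_valid_dataset; infer_instance

-- ===== CLAIM (what is proved, stated in full; the proofs are below) =====
def Claim_equal_get_valid_dataset : Prop := ∀ (dataset : List (String × List (List (String × List String)))), Dom_get_valid_dataset dataset → Pre_get_valid_dataset dataset → Spec_get_valid_dataset dataset (get_valid_dataset dataset)


-- ===== LEMMAS AND PROOFS =====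

-- the labels of annotation j of a zipped row (shared shape of A's inner access)
def pvLab (r : List (List (String × List String))) (j : Nat) : List String :=
  PySem.Dict.getD (PySem.Dict.mk (r.getD j [])) "labels" []

-- A's inner loop over one surviving row
def pvStep (names : List String) (vl : PySem.Dict String (List (List String)))
    (r : List (List (String × List String))) : PySem.Dict String (List (List String)) :=
  (List.range r.length).foldl (fun vl j => vl.modify (names.getD j "") [] (· ++ [pvLab r j])) vl

theorem pv_singleton_iff (s : List String) :
    (s.length = 1 ∧ s.getD 0 "" = "O") ↔ s = ["O"] := by
  match s with
  | [] => simp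
  | [x] => simp [List.getD]
  | x :: y :: t => simp

theorem pv_check_eq (l : List String) :
    check_if_empty l = PySem.Set.equal (PySem.Set.ofList l) ["O"] := by
  have hiff : PySem.Set.equal (PySem.Set.ofList l) ["O"] = true ↔ PySem.Set.ofList l = ["O"] := by
    constructor
    · intro h
      have hm := (PySem.Set.equal_iff _ _).mp h
      have hperm : (PySem.Set.ofList l).Perm ["O"] :=
        (List.perm_ext_iff_of_nodup (PySem.Set.nodup_ofList l) (by simp)).mpr hm
      exact List.perm_singleton.mp hperm
    · intro h; rw [h]; exact (PySem.Set.equal_iff _ _).mpr (by simp)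
  have hc : check_if_empty l = true ↔ PySem.Set.ofList l = ["O"] := by
    unfold check_if_empty
    rw [← pv_singleton_iff (PySem.Set.ofList l)]
    simp
  cases hb : PySem.Set.equal (PySem.Set.ofList l) ["O"] with
  | false =>
    cases hcv : check_if_empty l with
    | false => rfl
    | true => exact absurd (hiff.mpr (hc.mp hcv)) (by simp [hb])
  | true => exact hc.mpr (hiff.mp hb)

theorem pv_foldl_filter {α β : Type} (p : α → Bool) (step : β → α → β) :
    ∀ (R : List α) (init : β),
      R.foldl (fun acc r => if p r then acc else step acc r) init
        = (R.filter (fun r => ! p r)).foldl step init := by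
  intro R
  induction R with
  | nil => intro init; rfl
  | cons r R ih =>
    intro init
    by_cases h : p r = true <;> simp [h, ih]

theorem pv_map_getD_range (xs : List String) (d : String) :
    (List.range xs.length).map (fun j => xs.getD j d) = xs := by
  apply List.ext_getElem
  · simp
  · intro i h1 h2
    simp only [List.getElem_map, List.getElem_range]
    exact List.getD_eq_getElem _ _ (by simpa using h2)

theorem pv_step_eq (names : List String) (vl : PySem.Dict String (List (List String)))
    (r : List (List (String × List String))) :
    pvStep names vl r
      = ((List.range r.length).map (fun j => (names.getD j "", pvLab r j))).foldl
          (fun d p => d.modify p.1 [] (· ++ [p.2])) vl := by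
  unfold pvStep
  rw [List.foldl_map]

theorem pv_getD_step (names : List String) (hnd : names.Nodup)
    (vl : PySem.Dict String (List (List String))) (r : List (List (String × List String)))
    (hr : r.length = names.length) (i : Nat) (hi : i < names.length) :
    (pvStep names vl r).getD (names.getD i "") []
      = vl.getD (names.getD i "") [] ++ [pvLab r i] := by
  rw [pv_step_eq, PySem.Dict.getD_foldl_modify_append]
  congr 1
  rw [List.filter_map]
  have hcong : ∀ j ∈ List.range r.length,
      (((fun p => p.1 == names.getD i "") ∘ fun j => (names.getD j "", pvLab r j)) j) = (j == i) := by
    intro j hj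
    simp only [List.mem_range, hr] at hj
    simp only [Function.comp_apply]
    rw [List.getD_eq_getElem _ _ hj, List.getD_eq_getElem _ _ hi]
    by_cases h : j = i
    · simp [h]
    · have hne : names[j] ≠ names[i] := by
        intro hEq
        exact h (hnd.getElem_inj_iff.mp hEq)
      simp [h, hne]
  rw [List.filter_congr hcong, List.filter_beq]
  have hcount : (List.range r.length).count i = 1 :=
    List.count_eq_one_of_mem List.nodup_range (by simp [List.mem_range, hr, hi])
  rw [hcount]
  simp

theorem pv_keys_step (names : List String) (vl : PySem.Dict String (List (List String)))
    (r : List (List (String × List String))) (hr : r.length = names.length) :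
    (pvStep names vl r).keys = PySem.Set.update vl.keys names := by
  rw [pv_step_eq]
  have hk := PySem.Dict.keys_foldl_modify_key
    ((List.range r.length).map (fun j => (names.getD j "", pvLab r j)))
    (fun p => p.1) [] (fun _ p v => v ++ [p.2]) vl
  refine Eq.trans hk ?_
  rw [List.map_map]
  have hcomp : ((fun p => p.1) ∘ fun j => (names.getD j "", pvLab r j)) = fun j => names.getD j "" := rfl
  rw [hcomp, hr, pv_map_getD_range]

theorem pv_update_of_subset :
    ∀ (xs : List String) (s : PySem.Set String), (∀ x ∈ xs, x ∈ s) → PySem.Set.update s xs = s := by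
  intro xs
  induction xs with
  | nil => intro s _; rfl
  | cons x t ih =>
    intro s h
    have h1 : PySem.Set.update s (x :: t) = PySem.Set.update (PySem.Set.add s x) t := rfl
    rw [h1, PySem.Set.add_of_mem (h x (by simp))]
    exact ih s (fun y hy => h y (by simp [hy]))

theorem pv_update_fresh :
    ∀ (xs : List String) (s : PySem.Set String), xs.Nodup → (∀ x ∈ xs, x ∉ s) →
      PySem.Set.update s xs = s ++ xs := by
  intro xs
  induction xs with
  | nil => intro s _ _; rw [List.append_nil]; rfl
  | cons x t ih =>
    intro s hnd h
    have h1 : PySem.Set.update s (x :: t) = PySem.Set.update (PySem.Set.add s x) t := rfl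
    rw [h1, PySem.Set.add_of_not_mem (h x (by simp))]
    rw [ih (s ++ [x]) hnd.of_cons]
    · simp
    · intro y hy
      simp only [List.mem_append, List.mem_singleton]
      rintro (hs | rfl)
      · exact h y (by simp [hy]) hs
      · exact (List.nodup_cons.mp hnd).1 hy

theorem pv_getD_fold (names : List String) (hnd : names.Nodup) (i : Nat) (hi : i < names.length) :
    ∀ (R : List (List (List (String × List String)))) (vl : PySem.Dict String (List (List String))),
      (∀ r ∈ R, r.length = names.length) →
      (R.foldl (pvStep names) vl).getD (names.getD i "") []
        = vl.getD (names.getD i "") [] ++ R.map (fun r => pvLab r i) := by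
  intro R
  induction R with
  | nil => intro vl _; simp
  | cons r R ih =>
    intro vl h
    rw [List.foldl_cons, ih _ (fun r' hr' => h r' (by simp [hr']))]
    rw [pv_getD_step names hnd vl r (h r (by simp)) i hi]
    simp

theorem pv_keys_fold (names : List String) :
    ∀ (R : List (List (List (String × List String)))) (vl : PySem.Dict String (List (List String))),
      (∀ r ∈ R, r.length = names.length) → (∀ x ∈ names, x ∈ vl.keys) →
      (R.foldl (pvStep names) vl).keys = vl.keys := by
  intro R
  induction R with
  | nil => intro vl _ _; rfl
  | cons r R ih =>
    intro vl h hsub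
    rw [List.foldl_cons]
    have hk : (pvStep names vl r).keys = vl.keys := by
      rw [pv_keys_step names vl r (h r (by simp))]
      exact pv_update_of_subset names vl.keys hsub
    rw [ih _ (fun r' hr' => h r' (by simp [hr'])) (by rw [hk]; exact hsub), hk]

theorem pv_keys_fold_ne (names : List String) (hnd : names.Nodup)
    (R : List (List (List (String × List String)))) (hne : R ≠ [])
    (h : ∀ r ∈ R, r.length = names.length) :
    (R.foldl (pvStep names) PySem.Dict.empty).keys = names := by
  match R with
  | [] => exact absurd rfl hne
  | r :: R =>
    rw [List.foldl_cons]
    have hfirst : (pvStep names PySem.Dict.empty r).keys = names := by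
      rw [pv_keys_step names _ r (h r (by simp)), PySem.Dict.keys_empty]
      rw [pv_update_fresh names [] hnd (by simp)]
      rfl
    rw [pv_keys_fold names R _ (fun r' hr' => h r' (by simp [hr'])) (by rw [hfirst]; intro x hx; exact hx), hfirst]

theorem pv_zip_len (ls : List (List (List (String × List String)))) :
    ∀ r ∈ pvZipAll ls, r.length = ls.length := by
  intro r hr
  unfold pvZipAll at hr
  simp only [List.mem_map, List.mem_range] at hr
  obtain ⟨i, _, rfl⟩ := hr
  simp

-- membership in B's bad-index set: inner loop over the indices of one column
theorem pv_mem_bad_inner (cond : Nat → Bool) :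
    ∀ (m : List Nat) (s : PySem.Set Nat) (x : Nat),
      x ∈ m.foldl (fun s i => if cond i then PySem.Set.add s i else s) s
        ↔ x ∈ s ∨ (x ∈ m ∧ cond x = true) := by
  intro m
  induction m with
  | nil => intro s x; simp
  | cons i t ih =>
    intro s x
    rw [List.foldl_cons, ih]
    by_cases h : cond i = true
    · rw [if_pos h]
      constructor
      · rintro (hm | ⟨ht, hc⟩)
        · rcases (PySem.Set.mem_add s i x).mp hm with hs | rfl
          · exact Or.inl hs
          · exact Or.inr ⟨by simp, h⟩
        · exact Or.inr ⟨by simp [ht], hc⟩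
      · rintro (hs | ⟨hm, hc⟩)
        · exact Or.inl ((PySem.Set.mem_add s i x).mpr (Or.inl hs))
        · rcases List.mem_cons.mp hm with rfl | ht
          · exact Or.inl ((PySem.Set.mem_add s x x).mpr (Or.inr rfl))
          · exact Or.inr ⟨ht, hc⟩
    · rw [if_neg h]
      constructor
      · rintro (hs | ⟨ht, hc⟩)
        · exact Or.inl hs
        · exact Or.inr ⟨by simp [ht], hc⟩
      · rintro (hs | ⟨hm, hc⟩)
        · exact Or.inl hs
        · rcases List.mem_cons.mp hm with rfl | ht
          · exact absurd hc h
          · exact Or.inr ⟨ht, hc⟩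

-- membership in B's bad-index set: outer loop over the columns
theorem pv_mem_bad {α : Type} (cond : α → Nat → Bool) (m : List Nat) :
    ∀ (cs : List α) (s : PySem.Set Nat) (x : Nat),
      x ∈ cs.foldl (fun s col => m.foldl (fun s i => if cond col i then PySem.Set.add s i else s) s) s
        ↔ x ∈ s ∨ ∃ col ∈ cs, x ∈ m ∧ cond col x = true := by
  intro cs
  induction cs with
  | nil => intro s x; simp
  | cons c t ih =>
    intro s x
    rw [List.foldl_cons, ih, pv_mem_bad_inner]
    constructor
    · rintro ((hs | ⟨hm, hc⟩) | ⟨col, hcol, hm, hc⟩)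
      · exact Or.inl hs
      · exact Or.inr ⟨c, by simp, hm, hc⟩
      · exact Or.inr ⟨col, by simp [hcol], hm, hc⟩
    · rintro (hs | ⟨col, hcol, hm, hc⟩)
      · exact Or.inl (Or.inl hs)
      · rcases List.mem_cons.mp hcol with rfl | ht
        · exact Or.inl (Or.inr ⟨hm, hc⟩)
        · exact Or.inr ⟨col, ht, hm, hc⟩


-- ===== VERDICT (by name: the statement is the Claim_ definition above) =====
theorem get_valid_dataset_spec : Claim_equal_get_valid_dataset := by
  intro dataset _hdom hpre
  obtain ⟨hnd, _hlabels⟩ := hpre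
  unfold Spec_get_valid_dataset get_valid_dataset get_valid_dataset_alt
  simp only [pv_check_eq]
  set names := dataset.map (fun x => x.1) with hnames
  set ls := dataset.map (fun x => x.2) with hls
  set n := (((ls.map List.length).min?).getD 0) with hn
  set eqO : List (String × List String) → Bool := fun a =>
    PySem.Set.equal (PySem.Set.ofList (PySem.Dict.getD (PySem.Dict.mk a) "labels" [])) ["O"] with heqO
  set pb : List (List (String × List String)) → Bool := fun r => ! r.any eqO with hpb
  set rowOf : Nat → List (List (String × List String)) := fun i => ls.map (fun l => l.getD i []) with hrowOf
  set bad : PySem.Set Nat := ls.foldl (fun bad col =>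
    (List.range n).foldl (fun bad i => if eqO (col.getD i []) then PySem.Set.add bad i else bad) bad)
    PySem.Set.empty with hbad
  set keep := (List.range n).filter (fun i => ! PySem.Set.contains bad i) with hkeep
  set rows := (pvZipAll ls).filter pb with hrows
  -- A's fold = fold of pvStep over the filtered rows
  have hA : ((pvZipAll ls).foldl (fun vl annts =>
        if annts.any eqO then vl
        else (List.range annts.length).foldl
          (fun vl j => vl.modify (names.getD j "") [] (· ++ [PySem.Dict.getD (PySem.Dict.mk (annts.getD j [])) "labels" []])) vl)
      PySem.Dict.empty)
      = rows.foldl (pvStep names) PySem.Dict.empty :=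
    pv_foldl_filter (fun annts => annts.any eqO) (pvStep names) (pvZipAll ls) PySem.Dict.empty
  rw [hA]
  -- the filtered rows are exactly the kept indices, mapped through rowOf
  have hrowsKeep : rows = keep.map rowOf := by
    rw [hrows, hkeep]
    show (List.filter pb ((List.range n).map rowOf)) = _
    rw [List.filter_map]
    congr 1
    apply List.filter_congr
    intro i hi
    have hin : i < n := List.mem_range.mp hi
    show pb (rowOf i) = ! PySem.Set.contains bad i
    have h1 : (rowOf i).any eqO = ls.any (fun col => eqO (col.getD i [])) := by
      rw [hrowOf]; exact List.any_map
    have h2 : PySem.Set.contains bad i = ls.any (fun col => eqO (col.getD i [])) := by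
      rw [Bool.eq_iff_iff, PySem.Set.contains_iff, hbad,
        pv_mem_bad (fun col j => eqO (col.getD j [])) (List.range n) ls PySem.Set.empty i,
        List.any_eq_true]
      constructor
      · rintro (hs | ⟨col, hcol, _, hc⟩)
        · exact absurd hs (by simp [PySem.Set.empty])
        · exact ⟨col, hcol, hc⟩
      · rintro ⟨col, hcol, hc⟩
        exact Or.inr ⟨col, hcol, List.mem_range.mpr hin, hc⟩
    rw [hpb]
    simp only [h1, h2]
  by_cases hempty : keep = []
  · rw [hrowsKeep, hempty]
    simp
  · have hrowsne : rows ≠ [] := by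
      rw [hrowsKeep]
      simpa using hempty
    have hIsE : keep.isEmpty = false := by simpa [List.isEmpty_iff] using hempty
    rw [hIsE]
    simp only [Bool.false_eq_true, if_false]
    have hlen : ∀ r ∈ rows, r.length = names.length := by
      intro r hr
      have := pv_zip_len ls r (List.mem_of_mem_filter hr)
      rw [this, hls, hnames]; simp
    have hkeys := pv_keys_fold_ne names hnd rows hrowsne hlen
    have hAitems := PySem.Dict.items_eq_map_keys (rows.foldl (pvStep names) PySem.Dict.empty)
      (by rw [hkeys]; exact hnd) []
    rw [hkeys] at hAitems
    have hBitems := PySem.Dict.items_foldl_insert_fresh dataset (fun kv => kv.1)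
      (fun kv => keep.map (fun i => PySem.Dict.getD (PySem.Dict.mk (kv.2.getD i [])) "labels" []))
      PySem.Dict.empty
      (by intro a _; exact PySem.Dict.contains_empty _)
      hnd
    rw [hAitems, hBitems]
    have hitemsE : (PySem.Dict.empty : PySem.Dict String (List (List String))).items = [] := rfl
    rw [hitemsE, List.nil_append]
    apply List.ext_getElem
    · simp [hnames]
    · intro pos h1 h2
      have hposD : pos < dataset.length := by simpa using h2
      have hposN : pos < names.length := by simpa [hnames] using hposD
      have hposL : pos < ls.length := by simpa [hls] using hposD
      simp only [List.getElem_map]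
      refine Prod.ext ?_ ?_
      · show names[pos] = dataset[pos].1
        simp [hnames]
      · show (rows.foldl (pvStep names) PySem.Dict.empty).getD names[pos] []
            = keep.map (fun i => PySem.Dict.getD (PySem.Dict.mk (dataset[pos].2.getD i [])) "labels" [])
        have hgetD := pv_getD_fold names hnd pos hposN rows PySem.Dict.empty hlen
        rw [List.getD_eq_getElem _ _ hposN] at hgetD
        rw [hgetD, PySem.Dict.getD_empty, List.nil_append, hrowsKeep, List.map_map]
        apply List.map_congr_left
        intro i _
        show pvLab (rowOf i) pos = _
        have hrow : (rowOf i).getD pos [] = dataset[pos].2.getD i [] := by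
          rw [hrowOf]
          rw [List.getD_eq_getElem _ _ (by simpa [hls] using hposL), List.getElem_map]
          congr 1
          simp [hls]
        rw [pvLab, hrow]
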